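-- pv_equiv track=rewrite | github.com/datawhalechina/huawei-od-python | codes/others100/054_shout-seven.py | solve_method
-- ===== SOURCE A (Python) =====
-- def solve_method(nums):
--     result = [0] * len(nums)
--     N = 7 * (sum(nums) + len(nums))
--     j = 0
--     for i in range(1, N):
--         # 判断当前j在列表中的位置
--         j %= len(nums)
--         # 如果当前数字是7的倍数或者含有7
--         if i % 7 == 0 or '7' in str(i):
--             result[j] += 1
--             # 如果结果列表的总和等于输入数字的总和，终止循环
--             if sum(result) == sum(nums):
--                 break
--         j += 1
--
--     return result
-- ===== SOURCE B (Python) =====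
-- def solve_method(nums):
--     n = len(nums)
--     s = sum(nums)
--     limit = 7 * (s + n)
--     # phase 1: locate the exclusive cutoff where the game stops
--     # (the break can only ever fire when the target shout count s is >= 1)
--     cutoff = limit
--     if s >= 1:
--         shouts = 0
--         for i in range(1, limit):
--             if i % 7 == 0 or '7' in str(i):
--                 shouts += 1
--                 if shouts == s:
--                     cutoff = i + 1
--                     break
--     # phase 2: histogram of seat indices of the shout numbers below the cutoff
--     hist = {}
--     for i in range(1, cutoff):
--         if i % 7 == 0 or '7' in str(i):
--             r = (i - 1) % n
--             hist[r] = hist.get(r, 0) + 1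
--     return [hist.get(p, 0) for p in range(n)]
-- ===== Notes on version B (the rewrite author's own statement) =====
-- stated objective: alternative
-- what changed: B replaces A's single stateful simulation (running seat pointer j, in-place list increments, and a full sum(result)/sum(nums) rescan after every shout) by two independent staged passes: pass 1 only locates the cutoff where the game stops using a shout counter, pass 2 builds a dict histogram of seat indices (i-1)%n of the shout numbers below the cutoff, and the result list is emitted by a comprehension over the histogram.
import Mathlib
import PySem

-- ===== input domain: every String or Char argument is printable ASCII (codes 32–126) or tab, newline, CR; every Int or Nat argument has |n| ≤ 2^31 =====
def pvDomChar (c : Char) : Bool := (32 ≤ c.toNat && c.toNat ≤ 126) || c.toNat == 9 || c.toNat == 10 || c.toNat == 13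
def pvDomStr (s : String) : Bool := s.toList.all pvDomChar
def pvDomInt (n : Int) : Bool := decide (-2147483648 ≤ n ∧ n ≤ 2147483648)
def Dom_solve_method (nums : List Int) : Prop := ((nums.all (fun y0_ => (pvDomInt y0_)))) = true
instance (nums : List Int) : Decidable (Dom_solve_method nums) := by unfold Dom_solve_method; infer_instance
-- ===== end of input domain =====

-- B replaces A's stateful simulation (seat pointer j, in-place increments, sum() rescans after
-- every shout) by two staged passes — find the stopping cutoff with a shout counter, then a dict
-- histogram of seat indices — a different decomposition of the game (objective: alternative).


-- ===== PORT A =====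
-- shared condition "i % 7 == 0 or '7' in str(i)" (the same expression in both Pythons)
def pvIsSeven (i : Int) : Bool :=
  (PySem.Int.mod i 7 == 0) || PySem.Str.isIn "7" (PySem.Int.toStr i)

-- the for-loop of A over the remaining range, with state (result, j); the inner
-- 'result[j] += 1' is ported with pySetD/pyGetD (j is always in range here:
-- 'j %= len(nums)' just ran, and the loop body is only reached when len(nums) > 0,
-- since for nums = [] the range is empty)
def solveLoopA (nums : List Int) : List Int → List Int → Int → List Int
  | [], r, _ => r
  | i :: rest, r, j =>
    let j' := PySem.Int.mod j (nums.length : Int)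
    if pvIsSeven i then
      let r' := PySem.List.pySetD r j' (PySem.List.pyGetD r j' 0 + 1)
      if r'.sum == nums.sum then r'
      else solveLoopA nums rest r' (j' + 1)
    else solveLoopA nums rest r (j' + 1)

def solve_method (nums : List Int) : List Int :=
  solveLoopA nums
    (PySem.List.pyRange 1 (7 * (nums.sum + (nums.length : Int))) 1)
    (List.replicate nums.length 0) 0

-- ===== PORT B =====
-- phase 1 of B: the for-loop with the shout counter; returns the exclusive cutoff
-- (the 'cutoff' argument carries the initial value 'limit', returned when no break fires)
def pvFindCut : List Int → Int → Int → Int → Int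
  | [], _, _, cutoff => cutoff
  | i :: rest, shouts, s, cutoff =>
    if pvIsSeven i then
      if shouts + 1 == s then i + 1
      else pvFindCut rest (shouts + 1) s cutoff
    else pvFindCut rest shouts s cutoff

def solve_method_alt (nums : List Int) : List Int :=
  let n : Int := nums.length
  let s : Int := nums.sum
  let limit : Int := 7 * (s + n)
  let cutoff : Int :=
    if 1 ≤ s then pvFindCut (PySem.List.pyRange 1 limit 1) 0 s limit else limit
  let hist : PySem.Dict Int Int :=
    (PySem.List.pyRange 1 cutoff 1).foldl
      (fun d i =>
        if pvIsSeven i then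
          let r := PySem.Int.mod (i - 1) n
          d.insert r (d.getD r 0 + 1)
        else d)
      PySem.Dict.empty
  (PySem.List.pyRange 0 n 1).map (fun p => hist.getD p 0)

-- ===== PRECONDITION & SPEC =====
def Spec_solve_method (nums : List Int) (out : List Int) : Prop := out = solve_method_alt nums
instance (nums : List Int) (out : List Int) : Decidable (Spec_solve_method nums out) := by unfold Spec_solve_method; infer_instance

-- ===== CLAIM (what is proved, stated in full; the proofs are below) =====
def Claim_equal_solve_method : Prop := ∀ (nums : List Int), Dom_solve_method nums → Spec_solve_method nums (solve_method nums)

-- ===== LEMMAS AND PROOFS =====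

-- take the first d elements when 1 ≤ d, otherwise everything (A's break-truncation)
def pvTrunc (d : Int) (L : List Int) : List Int := if 1 ≤ d then L.take d.toNat else L

-- the list A's inner increment updates, as a plain fold step (proof-side name)
def pvBump (n : Int) (r : List Int) (i : Int) : List Int :=
  PySem.List.pySetD r (PySem.Int.mod (i - 1) n)
    (PySem.List.pyGetD r (PySem.Int.mod (i - 1) n) 0 + 1)

theorem pv_sum_set (r : List Int) (t : Nat) (ht : t < r.length) :
    (r.set t (r.getD t 0 + 1)).sum = r.sum + 1 := by
  induction r generalizing t with
  | nil => simp at ht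
  | cons x xs ih =>
    cases t with
    | zero => simp [List.getD]; ring
    | succ t =>
      simp only [List.length_cons, Nat.succ_lt_succ_iff] at ht
      rw [List.getD_cons_succ,
        show (x :: xs).set (t+1) (xs.getD t 0 + 1) = x :: xs.set t (xs.getD t 0 + 1) from rfl,
        List.sum_cons, List.sum_cons, ih t ht]
      ring

theorem pv_mod_succ (x n : Int) (hn : 0 < n) :
    PySem.Int.mod (PySem.Int.mod x n + 1) n = PySem.Int.mod (x + 1) n := by
  simp only [PySem.Int.mod_eq_emod_of_pos hn]
  rw [Int.emod_def x n,
    show x - n * (x / n) + 1 = x + 1 - n * (x / n) by ring,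
    Int.sub_mul_emod_self_left]

theorem pvBump_eq (n : Int) (r : List Int) (i : Int) (hn : 0 < n) :
    pvBump n r i
      = r.set (PySem.Int.mod (i - 1) n).toNat
          (r.getD (PySem.Int.mod (i - 1) n).toNat 0 + 1) := by
  have h0 : 0 ≤ PySem.Int.mod (i - 1) n := PySem.Int.mod_nonneg _ hn
  rw [pvBump, PySem.List.pyGetD_of_nonneg r 0 h0, PySem.List.pySetD_of_nonneg r _ h0]

theorem pvBump_length (n : Int) (r : List Int) (i : Int) :
    (pvBump n r i).length = r.length := by
  simp [pvBump, PySem.List.length_pySetD]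

theorem pvBump_sum (n : Int) (r : List Int) (i : Int) (hn : 0 < n) (hr : (r.length : Int) = n) :
    (pvBump n r i).sum = r.sum + 1 := by
  rw [pvBump_eq n r i hn]
  apply pv_sum_set
  have h1 : PySem.Int.mod (i - 1) n < n := PySem.Int.mod_lt _ hn
  have h0 : 0 ≤ PySem.Int.mod (i - 1) n := PySem.Int.mod_nonneg _ hn
  omega

-- truncating a cons when the break cannot fire on its head
theorem pvTrunc_cons {d : Int} (hd : d ≠ 1) (a : Int) (F : List Int) :
    pvTrunc d (a :: F) = a :: pvTrunc (d - 1) F := by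
  unfold pvTrunc
  by_cases h1 : 1 ≤ d
  · rw [if_pos h1, if_pos (by omega : 1 ≤ d - 1),
      show d.toNat = (d - 1).toNat + 1 by omega, List.take_succ_cons]
  · rw [if_neg h1, if_neg (by omega)]

-- A-side loop invariant: A's loop over range(a, a+m) equals the fold of bumps over the
-- truncated filtered range, provided j ≡ a-1 (mod n) and result has length n
theorem pv_loop_eq (nums : List Int) (hn : 0 < nums.length) :
    ∀ (m : Nat) (a : Int) (r : List Int) (j : Int),
      r.length = nums.length →
      PySem.Int.mod j (nums.length : Int) = PySem.Int.mod (a - 1) (nums.length : Int) →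
      solveLoopA nums (PySem.List.pyRange a (a + m) 1) r j
        = (pvTrunc (nums.sum - r.sum)
            ((PySem.List.pyRange a (a + m) 1).filter pvIsSeven)).foldl
            (pvBump (nums.length : Int)) r := by
  intro m
  induction m with
  | zero =>
    intro a r j _ _
    rw [show a + ((0 : Nat) : Int) = a by push_cast; ring,
      PySem.List.pyRange_one_eq_nil (le_refl a)]
    unfold pvTrunc
    split <;> simp [solveLoopA]
  | succ m ih =>
    intro a r j hr hj
    have hnZ : (0 : Int) < (nums.length : Int) := by exact_mod_cast hn
    have hab : a < a + ((m + 1 : Nat) : Int) := by push_cast; omega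
    have hsplit : a + ((m + 1 : Nat) : Int) = (a + 1) + ((m : Nat) : Int) := by
      push_cast; ring
    rw [PySem.List.pyRange_one_cons hab, hsplit]
    have hnext : PySem.Int.mod (PySem.Int.mod (a - 1) (nums.length : Int) + 1)
        (nums.length : Int) = PySem.Int.mod ((a + 1) - 1) (nums.length : Int) := by
      rw [pv_mod_succ _ _ hnZ]
      norm_num
    by_cases hs : pvIsSeven a
    · -- shout number: result[j] += 1, maybe break
      have hbump : PySem.List.pySetD r (PySem.Int.mod (a - 1) (nums.length : Int))
          (PySem.List.pyGetD r (PySem.Int.mod (a - 1) (nums.length : Int)) 0 + 1)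
          = pvBump (nums.length : Int) r a := rfl
      have hrlen : ((r.length : Nat) : Int) = (nums.length : Int) := by exact_mod_cast hr
      have hsum : (pvBump (nums.length : Int) r a).sum = r.sum + 1 :=
        pvBump_sum _ r a hnZ hrlen
      simp only [solveLoopA, hs, if_true, hj, hbump, hsum, List.filter_cons]
      by_cases hd : r.sum + 1 = nums.sum
      · -- break fires: exactly the sum(nums)-th shout
        have : (r.sum + 1 == nums.sum) = true := by simp [hd]
        rw [this]
        simp only [if_true]
        have hd1 : nums.sum - r.sum = 1 := by omega
        rw [hd1]
        unfold pvTrunc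
        norm_num
      · have : (r.sum + 1 == nums.sum) = false := by simp [hd]
        rw [this]
        simp only [Bool.false_eq_true, if_false]
        rw [ih (a + 1) (pvBump (nums.length : Int) r a) _
          (by rw [pvBump_length]; exact hr) hnext, hsum]
        rw [pvTrunc_cons (by omega) a _, List.foldl_cons,
          show nums.sum - r.sum - 1 = nums.sum - (r.sum + 1) by ring]
    · -- not a shout number: j moves on, result unchanged
      simp only [solveLoopA, hs, Bool.false_eq_true, if_false, hj, List.filter_cons]
      exact ih (a + 1) r _ hr hnext

-- a fold with 'if p then step' is the fold of the step over the filtered list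
theorem pv_foldl_if {α : Type} (l : List Int) (p : Int → Bool) (f : α → Int → α) (init : α) :
    l.foldl (fun acc x => if p x then f acc x else acc) init = (l.filter p).foldl f init := by
  induction l generalizing init with
  | nil => rfl
  | cons x xs ih => simp only [List.filter_cons, List.foldl_cons]; split <;> simp [ih]

-- reading one seat of a bumped result list
theorem pv_getD_bump (n : Int) (hn : 0 < n) (r : List Int) (hr : (r.length : Int) = n)
    (i p : Int) (hp0 : 0 ≤ p) :
    PySem.List.pyGetD (pvBump n r i) p 0
      = PySem.List.pyGetD r p 0 + if PySem.Int.mod (i - 1) n = p then 1 else 0 := by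
  have hk0 : 0 ≤ PySem.Int.mod (i - 1) n := PySem.Int.mod_nonneg _ hn
  have hk1 : PySem.Int.mod (i - 1) n < n := PySem.Int.mod_lt _ hn
  rw [pvBump_eq n r i hn, PySem.List.pyGetD_of_nonneg _ 0 hp0,
    PySem.List.pyGetD_of_nonneg _ 0 hp0]
  have hlt : (PySem.Int.mod (i - 1) n).toNat < r.length := by omega
  rw [show ((r.set (PySem.Int.mod (i - 1) n).toNat
      (r.getD (PySem.Int.mod (i - 1) n).toNat 0 + 1)).getD p.toNat 0)
      = if (PySem.Int.mod (i - 1) n).toNat = p.toNat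
        then r.getD (PySem.Int.mod (i - 1) n).toNat 0 + 1 else r.getD p.toNat 0 by
    simp [List.getD, List.getElem?_set, hlt]
    split
    · simp_all
    · rfl]
  by_cases h : PySem.Int.mod (i - 1) n = p
  · rw [if_pos h, if_pos (by omega), h]
  · rw [if_neg (by omega), if_neg h, add_zero]

-- folding the bumps over the shout list S equals, seat by seat, the count of
-- shout numbers whose seat (i-1) % n is that seat
theorem pv_fold_bump (n : Int) (hn : 0 < n) :
    ∀ (S : List Int) (r : List Int), (r.length : Int) = n →
      S.foldl (pvBump n) r
        = (PySem.List.pyRange 0 n 1).map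
            (fun p => PySem.List.pyGetD r p 0
              + ((S.map (fun i => PySem.Int.mod (i - 1) n)).count p)) := by
  intro S
  induction S with
  | nil =>
    intro r hr
    simp only [List.foldl_nil, List.map_nil, List.count_nil]
    rw [← hr]
    simp [PySem.List.map_pyGetD_pyRange_zero' r (0 : Int)]
  | cons i S ih =>
    intro r hr
    rw [List.foldl_cons, ih (pvBump n r i) (by rw [pvBump_length]; exact hr)]
    apply List.map_congr_left
    intro p hp
    rw [PySem.List.mem_pyRange_one] at hp
    rw [pv_getD_bump n hn r hr i p hp.1, List.map_cons, List.count_cons]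
    simp only [beq_iff_eq]
    by_cases h : PySem.Int.mod (i - 1) n = p
    · rw [if_pos h, if_pos h]; push_cast; ring
    · rw [if_neg h, if_neg h]; push_cast; ring

-- phase-1 cutoff: the filtered range below the cutoff is exactly the first s-c shouts
theorem pv_cut (s lim : Int) :
    ∀ (m : Nat) (a c : Int), lim = a + m → c < s →
      (PySem.List.pyRange a (pvFindCut (PySem.List.pyRange a lim 1) c s lim) 1).filter pvIsSeven
        = ((PySem.List.pyRange a lim 1).filter pvIsSeven).take (s - c).toNat
      ∧ a ≤ pvFindCut (PySem.List.pyRange a lim 1) c s lim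
      ∧ pvFindCut (PySem.List.pyRange a lim 1) c s lim ≤ lim := by
  intro m
  induction m with
  | zero =>
    intro a c hm _
    have ha : lim = a := by omega
    subst ha
    rw [PySem.List.pyRange_one_eq_nil (le_refl lim)]
    simp [pvFindCut, PySem.List.pyRange_one_eq_nil (le_refl lim)]
  | succ m ih =>
    intro a c hm hc
    have hab : a < lim := by omega
    rw [PySem.List.pyRange_one_cons hab]
    by_cases hs : pvIsSeven a
    · by_cases hbr : c + 1 = s
      · -- break: cutoff = a + 1
        have : (c + 1 == s) = true := by simp [hbr]
        simp only [pvFindCut, hs, if_true, this]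
        have h1 : (s - c).toNat = 1 := by omega
        refine ⟨?_, by omega, by omega⟩
        rw [PySem.List.pyRange_one_cons (by omega : a < a + 1),
          PySem.List.pyRange_one_eq_nil (le_refl (a + 1)), h1, List.filter_cons, List.filter_cons]
        simp [hs]
      · have : (c + 1 == s) = false := by simp [hbr]
        simp only [pvFindCut, hs, if_true, this, Bool.false_eq_true, if_false]
        obtain ⟨h1, h2, h3⟩ := ih (a + 1) (c + 1) (by push_cast at hm ⊢; omega) (by omega)
        refine ⟨?_, by omega, h3⟩
        rw [PySem.List.pyRange_one_cons (by omega : a < pvFindCut (PySem.List.pyRange (a+1) lim 1) (c+1) s lim),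
          List.filter_cons, List.filter_cons]
        simp only [hs, if_true, h1]
        rw [show (s - c).toNat = (s - (c + 1)).toNat + 1 by omega, List.take_succ_cons]
    · simp only [pvFindCut, hs, Bool.false_eq_true, if_false]
      obtain ⟨h1, h2, h3⟩ := ih (a + 1) c (by push_cast at hm ⊢; omega) hc
      refine ⟨?_, by omega, h3⟩
      rw [PySem.List.pyRange_one_cons (by omega : a < pvFindCut (PySem.List.pyRange (a+1) lim 1) c s lim),
        List.filter_cons, List.filter_cons]
      simp [hs, h1]

-- every seat of the all-zero start list reads 0
theorem pv_getD_replicate (k : Nat) (p : Int) :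
    PySem.List.pyGetD (List.replicate k (0 : Int)) p 0 = 0 := by
  unfold PySem.List.pyGetD
  cases h : PySem.List.pyGet? (List.replicate k (0 : Int)) p with
  | none => rfl
  | some v =>
    have : v ∈ List.replicate k (0 : Int) := by
      unfold PySem.List.pyGet? PySem.List.pyIdx? at h
      split at h
      · split at h
        · exact List.mem_of_getElem? (by simpa using h)
        · simp at h
      · split at h
        · exact List.mem_of_getElem? (by simpa using h)
        · simp at h
    simp [List.eq_of_mem_replicate this]

-- B's histogram read back seat by seat is the residue count of the filtered range below the cutoff
theorem pv_hist_getD (n cutoff : Int) (p : Int) :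
    ((PySem.List.pyRange 1 cutoff 1).foldl
        (fun d i =>
          if pvIsSeven i then
            let r := PySem.Int.mod (i - 1) n
            d.insert r (d.getD r 0 + 1)
          else d)
        (PySem.Dict.empty : PySem.Dict Int Int)).getD p 0
      = (((PySem.List.pyRange 1 cutoff 1).filter pvIsSeven).map
          (fun i => PySem.Int.mod (i - 1) n)).count p := by
  rw [pv_foldl_if]
  rw [show (((PySem.List.pyRange 1 cutoff 1).filter pvIsSeven).foldl
      (fun d i =>
        let r := PySem.Int.mod (i - 1) n
        d.insert r (d.getD r 0 + 1)) (PySem.Dict.empty : PySem.Dict Int Int))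
      = ((((PySem.List.pyRange 1 cutoff 1).filter pvIsSeven).map
          (fun i => PySem.Int.mod (i - 1) n)).foldl
          (fun d x => d.insert x (d.getD x 0 + 1)) PySem.Dict.empty) by
    rw [List.foldl_map]]
  rw [PySem.Dict.getD_foldl_insert_add_one]
  simp [PySem.Dict.getD_empty]

-- ===== VERDICT (by name: the statement is the Claim_ definition above) =====
theorem solve_method_spec : Claim_equal_solve_method := by
  intro nums _
  unfold Spec_solve_method
  by_cases hnil : nums = []
  · subst hnil; decide
  · have hn : 0 < nums.length := List.length_pos_iff.mpr hnil
    have hnZ : (0 : Int) < (nums.length : Int) := by exact_mod_cast hn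
    unfold solve_method solve_method_alt
    simp only []
    set n : Int := (nums.length : Int) with hndef
    set s : Int := nums.sum with hsdef
    set lim : Int := 7 * (s + n) with hlim
    -- B's cutoff and the truncation agree: the filtered range below the cutoff is pvTrunc s F
    have hcut : (PySem.List.pyRange 1
          (if 1 ≤ s then pvFindCut (PySem.List.pyRange 1 lim 1) 0 s lim else lim) 1).filter pvIsSeven
        = pvTrunc s ((PySem.List.pyRange 1 lim 1).filter pvIsSeven) := by
      by_cases hs1 : 1 ≤ s
      · rw [if_pos hs1]
        unfold pvTrunc
        rw [if_pos hs1]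
        by_cases hl1 : 1 ≤ lim
        · obtain ⟨h1, _, _⟩ := pv_cut s lim (lim - 1).toNat 1 0 (by omega) (by omega)
          simpa using h1
        · rw [PySem.List.pyRange_one_eq_nil (by omega : lim ≤ 1)]
          simp [pvFindCut, PySem.List.pyRange_one_eq_nil (by omega : lim ≤ 1)]
      · rw [if_neg hs1]
        unfold pvTrunc
        rw [if_neg hs1]
    -- A's loop as the fold of bumps over the truncated filtered range
    have hA : solveLoopA nums (PySem.List.pyRange 1 lim 1) (List.replicate nums.length 0) 0
        = (pvTrunc s ((PySem.List.pyRange 1 lim 1).filter pvIsSeven)).foldl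
            (pvBump n) (List.replicate nums.length 0) := by
      by_cases hl1 : 1 ≤ lim
      · have hm : lim = 1 + (((lim - 1).toNat : Nat) : Int) := by omega
        rw [hm, pv_loop_eq nums hn _ 1 (List.replicate nums.length 0) 0 (by simp) (by norm_num)]
        rw [show (List.replicate nums.length (0 : Int)).sum = 0 by simp, ← hm]
        rw [show nums.sum - 0 = s by rw [hsdef]; ring]
      · rw [PySem.List.pyRange_one_eq_nil (by omega : lim ≤ 1)]
        unfold pvTrunc
        split <;> simp [solveLoopA]
    rw [hA,
      pv_fold_bump n hnZ _ (List.replicate nums.length 0) (by simp [hndef])]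
    apply List.map_congr_left
    intro p _
    rw [pv_hist_getD n _ p, hcut, pv_getD_replicate, zero_add]
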